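-- pv_equiv track=rewrite | github.com/davekokel/carp_v2_mirror | supabase/ui/lib/labels_roll_2x1_5.py | _base32_crockford
-- ===== SOURCE A (Python) =====
-- _ALPH = "0123456789ABCDEFGHJKMNPQRSTVWXYZ"
--
-- def _base32_crockford(n: int) -> str:
--     if n == 0:
--         return "0"
--     out, x = [], abs(n)
--     while x:
--         x, r = divmod(x, 32)
--         out.append(_ALPH[r])
--     return "".join(reversed(out))
-- ===== SOURCE B (Python) =====
-- _ALPH = "0123456789ABCDEFGHJKMNPQRSTVWXYZ"
--
-- def _base32_crockford(n: int) -> str: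
--     x = abs(n)
--     if x < 32:
--         return _ALPH[x]
--     return _base32_crockford(x // 32) + _ALPH[x % 32]
-- ===== Notes on version B (the rewrite author's own statement) =====
-- stated objective: simpler
-- what changed: Replaces the explicit while loop with list accumulator and final reverse-join by a direct recursion on the magnitude that emits digits most-significant-first (base case x < 32 also covers n == 0).
import Mathlib
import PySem

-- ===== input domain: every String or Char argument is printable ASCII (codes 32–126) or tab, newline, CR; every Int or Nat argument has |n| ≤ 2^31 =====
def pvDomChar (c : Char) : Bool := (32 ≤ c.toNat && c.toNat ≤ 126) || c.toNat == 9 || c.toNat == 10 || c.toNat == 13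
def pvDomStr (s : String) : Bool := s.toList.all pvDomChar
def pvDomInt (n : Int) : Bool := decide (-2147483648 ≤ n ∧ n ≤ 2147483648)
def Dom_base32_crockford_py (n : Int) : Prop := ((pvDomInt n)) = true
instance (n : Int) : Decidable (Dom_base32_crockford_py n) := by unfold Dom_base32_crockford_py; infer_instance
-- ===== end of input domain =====

-- B replaces A's while-loop + accumulator + reverse-join by a direct recursion on the
-- magnitude emitting digits most-significant-first (objective: simpler).

-- ===== PORT A =====
-- _ALPH as a character list; pvDigit r = _ALPH[r] (r = divmod remainder, always < 32)
def pvAlph : List Char := "0123456789ABCDEFGHJKMNPQRSTVWXYZ".toList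

def pvDigit (r : Nat) : Char := pvAlph.getD r '0'

-- the 'while x: x, r = divmod(x, 32); out.append(_ALPH[r])' loop of A
def pvALoop (x : Nat) (out : List Char) : List Char :=
  if x = 0 then out
  else pvALoop (x / 32) (out ++ [pvDigit (x % 32)])
termination_by x
decreasing_by exact Nat.div_lt_self (Nat.pos_of_ne_zero (by assumption)) (by omega)

def base32_crockford_py (n : Int) : String :=
  if n = 0 then "0"
  else String.ofList (pvALoop n.natAbs []).reverse

-- ===== PORT B =====
def pvBRec (x : Nat) : String :=
  if x < 32 then String.ofList [pvDigit x]
  else pvBRec (x / 32) ++ String.ofList [pvDigit (x % 32)]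
termination_by x
decreasing_by exact Nat.div_lt_self (by omega) (by omega)

def base32_crockford_py_alt (n : Int) : String := pvBRec n.natAbs

-- ===== PRECONDITION & SPEC =====
def Spec_base32_crockford_py (n : Int) (out : String) : Prop := out = base32_crockford_py_alt n
instance (n : Int) (out : String) : Decidable (Spec_base32_crockford_py n out) := by unfold Spec_base32_crockford_py; infer_instance

-- ===== CLAIM (what is proved, stated in full; the proofs are below) =====
def Claim_equal_base32_crockford_py : Prop := ∀ (n : Int), Dom_base32_crockford_py n → Spec_base32_crockford_py n (base32_crockford_py n)

-- ===== LEMMAS AND PROOFS =====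

theorem pvALoop_prefix (x : Nat) : ∀ out, pvALoop x out = out ++ pvALoop x [] := by
  induction x using Nat.strong_induction_on with
  | _ x ih =>
    intro out
    by_cases h : x = 0
    · simp [pvALoop, h]
    · conv_lhs => rw [pvALoop, if_neg h]
      conv_rhs => rw [pvALoop, if_neg h]
      rw [ih (x / 32) (Nat.div_lt_self (Nat.pos_of_ne_zero h) (by omega)) (out ++ [pvDigit (x % 32)]),
        ih (x / 32) (Nat.div_lt_self (Nat.pos_of_ne_zero h) (by omega)) ([] ++ [pvDigit (x % 32)])]
      simp

theorem pvMain (x : Nat) (hx : x ≠ 0) : String.ofList (pvALoop x []).reverse = pvBRec x := by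
  induction x using Nat.strong_induction_on with
  | _ x ih =>
    rw [pvALoop, if_neg hx, pvALoop_prefix]
    by_cases h : x < 32
    · have h0 : x / 32 = 0 := Nat.div_eq_of_lt h
      have hm : x % 32 = x := Nat.mod_eq_of_lt h
      rw [pvBRec, if_pos h]
      simp [h0, hm, pvALoop]
    · have hd : x / 32 ≠ 0 := by omega
      rw [pvBRec, if_neg h, ← ih (x / 32) (Nat.div_lt_self (Nat.pos_of_ne_zero hx) (by omega)) hd]
      have h2 : ([] ++ [pvDigit (x % 32)] ++ pvALoop (x / 32) []).reverse
          = (pvALoop (x / 32) []).reverse ++ [pvDigit (x % 32)] := by simp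
      rw [h2, String.ofList_append]

-- ===== VERDICT (by name: the statement is the Claim_ definition above) =====
theorem base32_crockford_py_spec : Claim_equal_base32_crockford_py := by
  intro n _
  unfold Spec_base32_crockford_py base32_crockford_py base32_crockford_py_alt
  by_cases h : n = 0
  · rw [if_pos h]; simp only [h]; rw [pvBRec]; decide
  · rw [if_neg h, pvMain n.natAbs (by simpa using h)]
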